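-- pv_equiv track=rewrite | github.com/public-arch/Marithmetics | zz_archive/gum_authority_archive_old/AOR_20260125T043902Z_52befea/unpacked_master_zip/GUM/authority_archive/AOR_20260125T043902Z_52befea/GUM_BUNDLE_v30_20260125T043902Z/capsules/DEMO-72/demo.py | v2
-- ===== SOURCE A (Python) =====
-- def v2(n: int) -> int:
--     if n == 0:
--         return 10**9
--     c = 0
--     while n % 2 == 0:
--         n //= 2
--         c += 1
--     return c
-- ===== SOURCE B (Python) =====
-- def v2(n: int) -> int:
--     if n == 0:
--         return 10**9
--     return (n & -n).bit_length() - 1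
-- ===== Notes on version B (the rewrite author's own statement) =====
-- stated objective: faster
-- what changed: Replaces the repeated-halving loop by the constant-number-of-bigint-ops low-bit trick (n & -n).bit_length() - 1.
import Mathlib
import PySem

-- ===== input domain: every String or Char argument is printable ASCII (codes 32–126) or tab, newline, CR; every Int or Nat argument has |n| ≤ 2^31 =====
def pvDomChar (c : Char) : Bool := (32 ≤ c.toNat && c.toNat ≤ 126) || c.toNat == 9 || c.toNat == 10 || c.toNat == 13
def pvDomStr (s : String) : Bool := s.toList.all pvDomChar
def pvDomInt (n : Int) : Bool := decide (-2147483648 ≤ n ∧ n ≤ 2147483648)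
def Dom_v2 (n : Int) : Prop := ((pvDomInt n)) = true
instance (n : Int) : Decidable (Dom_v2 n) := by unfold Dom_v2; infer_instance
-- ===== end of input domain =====

-- B replaces A's repeated-halving loop by Python's low-bit trick (n & -n).bit_length() - 1 (objective: faster).

-- ===== PORT A =====
-- the while loop: the `n ≠ 0` conjunct is a termination guard only (A enters the
-- loop only with n ≠ 0, and halving an even nonzero n keeps it nonzero)
def v2Loop (n : Int) (c : Int) : Int :=
  if n ≠ 0 ∧ n % 2 = 0 then v2Loop (n / 2) (c + 1) else c
  termination_by n.natAbs
  decreasing_by omega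

def v2 (n : Int) : Int :=
  if n = 0 then 10 ^ 9 else v2Loop n 0

-- ===== PORT B =====
-- Python's int.bit_length on a nonnegative value
def pyBitLength (m : Nat) : Nat := if m = 0 then 0 else Nat.log2 m + 1

-- `n & -n` is Python's two's-complement AND, which is exactly Int.land;
-- its value here is positive, so .natAbs is the faithful Nat reading of it
def v2_alt (n : Int) : Int :=
  if n = 0 then 10 ^ 9 else ((pyBitLength (Int.land n (-n)).natAbs : Int) - 1)

-- ===== PRECONDITION & SPEC =====
def Spec_v2 (n : Int) (out : Int) : Prop := out = v2_alt n
instance (n : Int) (out : Int) : Decidable (Spec_v2 n out) := by unfold Spec_v2; infer_instance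

-- ===== CLAIM (what is proved, stated in full; the proofs are below) =====
def Claim_equal_v2 : Prop := ∀ (n : Int), Dom_v2 n → Spec_v2 n (v2 n)

-- ===== LEMMAS AND PROOFS =====

-- bits of an odd number above position 0 agree with those of its predecessor
theorem testBit_pred_of_odd (m i : Nat) (hm : m % 2 = 1) :
    m.testBit (i + 1) = (m - 1).testBit (i + 1) := by
  rw [Nat.testBit_add_one, Nat.testBit_add_one]
  congr 1
  omega

-- the key bit identity: for odd m, (2^k*m) ldiff (2^k*m - 1) = 2^k
theorem ldiff_pred_eq_two_pow (k m : Nat) (hm : m % 2 = 1) :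
    Nat.ldiff (2 ^ k * m) (2 ^ k * m - 1) = 2 ^ k := by
  apply Nat.eq_of_testBit_eq
  intro i
  have hsub : 2 ^ k * m - 1 = 2 ^ k * (m - 1) + (2 ^ k - 1) := by
    have h2 : 0 < 2 ^ k := Nat.two_pow_pos k
    have h3 : 2 ^ k * (m - 1) = 2 ^ k * m - 2 ^ k := by
      rw [Nat.mul_sub, Nat.mul_one]
    have h4 : 2 ^ k ≤ 2 ^ k * m := Nat.le_mul_of_pos_right _ (by omega)
    omega
  rw [Nat.testBit_ldiff, hsub, Nat.testBit_two_pow_mul_add _ (by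
        exact Nat.sub_lt (Nat.two_pow_pos k) (by omega)),
      Nat.mul_comm, Nat.testBit_mul_two_pow, Nat.testBit_two_pow]
  rcases Nat.lt_trichotomy i k with h | h | h
  · simp [h, Nat.not_le_of_lt h, Nat.ne_of_gt h, Nat.testBit_two_pow_sub_one]
  · subst h
    simp [Nat.testBit_zero, hm]
    omega
  · have hik : k ≤ i := Nat.le_of_lt h
    have hne : k ≠ i := Nat.ne_of_lt h
    simp [hik, Nat.not_lt_of_le hik, hne]
    intro htb
    obtain ⟨j, hj⟩ : ∃ j, i - k = j + 1 := ⟨i - k - 1, by omega⟩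
    rw [hj] at htb ⊢
    rw [← testBit_pred_of_odd m j hm]
    exact htb

-- Python's n & -n, read through Int.land, as a Nat computation on |n|
theorem land_neg_eq (n : Int) (hn : n ≠ 0) :
    Int.land n (-n) = ((Nat.ldiff n.natAbs (n.natAbs - 1) : Nat) : Int) := by
  cases n with
  | ofNat a =>
      cases a with
      | zero => exact absurd rfl hn
      | succ b => rfl
  | negSucc a => rfl

-- loop characterization: stripping 2^k off 2^k * m (m odd) adds k to the counter
theorem v2Loop_eq (k : Nat) (m c : Int) (hm : m % 2 = 1) :
    v2Loop (2 ^ k * m) c = c + k := by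
  induction k generalizing c with
  | zero =>
      rw [v2Loop]
      simp only [pow_zero, one_mul]
      rw [if_neg (by omega)]
      omega
  | succ k ih =>
      rw [v2Loop]
      have hmne : m ≠ 0 := by omega
      have hpow : (2 : Int) ^ (k + 1) * m = 2 * (2 ^ k * m) := by ring
      have hne : (2 : Int) ^ (k + 1) * m ≠ 0 := by
        rw [hpow]
        exact mul_ne_zero (by norm_num) (mul_ne_zero (pow_ne_zero _ (by norm_num)) hmne)
      have hmod : (2 : Int) ^ (k + 1) * m % 2 = 0 := by
        rw [hpow]; exact Int.mul_emod_right 2 _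
      rw [if_pos ⟨hne, hmod⟩]
      have hdiv : (2 : Int) ^ (k + 1) * m / 2 = 2 ^ k * m := by
        rw [hpow]; exact Int.mul_ediv_cancel_left _ (by norm_num)
      rw [hdiv, ih (c + 1)]
      push_cast
      ring

-- every nonzero Int is ± 2^k * (odd), with the same k as its natAbs
theorem exists_decomp (n : Int) (hn : n ≠ 0) :
    ∃ (k m : Nat), m % 2 = 1 ∧ n.natAbs = 2 ^ k * m ∧
      ∃ (mi : Int), mi % 2 = 1 ∧ n = 2 ^ k * mi := by
  obtain ⟨k, m, hodd, heq⟩ := Nat.exists_eq_two_pow_mul_odd (n := n.natAbs)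
    (by simpa using hn)
  have hm1 : m % 2 = 1 := Nat.odd_iff.mp hodd
  refine ⟨k, m, hm1, heq, ?_⟩
  rcases Int.natAbs_eq n with h | h
  · refine ⟨(m : Int), ?_, ?_⟩
    · omega
    · rw [h, heq]; push_cast; ring
  · refine ⟨-(m : Int), ?_, ?_⟩
    · omega
    · rw [h, heq]; push_cast; ring

theorem v2_alt_eq (n : Int) (hn : n ≠ 0) (k m : Nat) (hm : m % 2 = 1)
    (heq : n.natAbs = 2 ^ k * m) : v2_alt n = k := by
  unfold v2_alt pyBitLength
  rw [if_neg hn, land_neg_eq n hn, heq, ldiff_pred_eq_two_pow k m hm]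
  simp [Nat.log2_two_pow]

-- ===== VERDICT (by name: the statement is the Claim_ definition above) =====
theorem v2_spec : Claim_equal_v2 := by
  intro n _
  unfold Spec_v2
  by_cases hn : n = 0
  · subst hn; rfl
  · obtain ⟨k, m, hm, heq, mi, hmi, hneq⟩ := exists_decomp n hn
    rw [v2_alt_eq n hn k m hm heq]
    unfold v2
    rw [if_neg hn, hneq, v2Loop_eq k mi 0 hmi]
    ring
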